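-- pv_equiv track=rewrite | github.com/MarcoMeuli/Python-3-HILCODE | block braker/Mapas_utils.py | generar_pos
-- ===== SOURCE A (Python) =====
-- def generar_pos(ancho_bloque, ancho_pantalla, alto_bloque, num_filas):
--     pos = list()
--     x = 0
--     y = 0
--     for j in range(num_filas):
--         fila =list()
--         for i in range(ancho_pantalla//ancho_bloque):
--             fila.append((x,y))
--             x += ancho_bloque
--         y += alto_bloque
--         x = 0
--         pos.append(fila)
--     return pos
-- ===== SOURCE B (Python) =====
-- def generar_pos(ancho_bloque, ancho_pantalla, alto_bloque, num_filas):
--     pos = []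
--     for _ in range(num_filas):
--         if not pos:
--             fila = [(i * ancho_bloque, 0) for i in range(ancho_pantalla // ancho_bloque)]
--         else:
--             fila = [(x, y + alto_bloque) for (x, y) in pos[-1]]
--         pos.append(fila)
--     return pos
-- ===== Notes on version B (the rewrite author's own statement) =====
-- stated objective: alternative
-- what changed: B computes only the first row from the column count and derives every later row by translating the previous row down by alto_bloque, instead of A's per-cell x/y accumulator loops.
import Mathlib
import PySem

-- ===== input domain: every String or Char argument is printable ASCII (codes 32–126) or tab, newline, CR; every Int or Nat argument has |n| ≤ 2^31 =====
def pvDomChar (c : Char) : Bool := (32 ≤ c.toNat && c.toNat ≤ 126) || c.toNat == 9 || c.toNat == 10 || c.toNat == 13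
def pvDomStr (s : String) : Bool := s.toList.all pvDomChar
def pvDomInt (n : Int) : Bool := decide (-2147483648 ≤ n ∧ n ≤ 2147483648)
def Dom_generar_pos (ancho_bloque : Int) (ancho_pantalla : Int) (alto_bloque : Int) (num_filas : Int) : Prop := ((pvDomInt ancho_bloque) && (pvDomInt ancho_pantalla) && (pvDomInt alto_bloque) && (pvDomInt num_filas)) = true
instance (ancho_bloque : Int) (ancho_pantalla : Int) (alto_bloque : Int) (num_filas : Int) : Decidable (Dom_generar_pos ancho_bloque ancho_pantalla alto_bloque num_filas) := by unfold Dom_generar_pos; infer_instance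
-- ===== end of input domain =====

-- B builds only the first row from the column count and derives each later row by
-- translating the previous row down by alto_bloque; A runs per-cell x/y accumulators.

-- ===== PORT A =====
def generar_pos (ancho_bloque : Int) (ancho_pantalla : Int) (alto_bloque : Int) (num_filas : Int) : List (List (Int × Int)) :=
  -- pos = []; x = 0; y = 0; for j in range(num_filas): … ; return pos
  let st := (PySem.List.pyRange 0 num_filas 1).foldl
    (fun (st : List (List (Int × Int)) × Int × Int) (_j : Int) =>
      -- fila = []; for i in range(ancho_pantalla//ancho_bloque): fila.append((x,y)); x += ancho_bloque
      let inner := (PySem.List.pyRange 0 (PySem.Int.floordiv ancho_pantalla ancho_bloque) 1).foldl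
        (fun (fx : List (Int × Int) × Int) (_i : Int) =>
          (fx.1 ++ [(fx.2, st.2.2)], fx.2 + ancho_bloque))
        (([] : List (Int × Int)), st.2.1)
      -- y += alto_bloque; x = 0; pos.append(fila)
      (st.1 ++ [inner.1], 0, st.2.2 + alto_bloque))
    (([], 0, 0) : List (List (Int × Int)) × Int × Int)
  st.1

-- ===== PORT B =====
def generar_pos_alt (ancho_bloque : Int) (ancho_pantalla : Int) (alto_bloque : Int) (num_filas : Int) : List (List (Int × Int)) :=
  -- pos = []; for _ in range(num_filas): fila = first row | previous row shifted; pos.append(fila)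
  (PySem.List.pyRange 0 num_filas 1).foldl
    (fun (pos : List (List (Int × Int))) (_ : Int) =>
      let fila := match pos.getLast? with
        | none => (PySem.List.pyRange 0 (PySem.Int.floordiv ancho_pantalla ancho_bloque) 1).map
            (fun i => (i * ancho_bloque, (0 : Int)))
        | some prev => prev.map (fun p => (p.1, p.2 + alto_bloque))
      pos ++ [fila])
    ([] : List (List (Int × Int)))

-- ===== PRECONDITION & SPEC =====
-- Pre_ excludes only the inputs where Python's '//' raises ZeroDivisionError:
-- ancho_bloque = 0 with at least one row (with num_filas ≤ 0 the division never runs and A returns []).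
def Pre_generar_pos (ancho_bloque : Int) (ancho_pantalla : Int) (alto_bloque : Int) (num_filas : Int) : Prop :=
  ancho_bloque ≠ 0 ∨ num_filas ≤ 0
instance (ancho_bloque : Int) (ancho_pantalla : Int) (alto_bloque : Int) (num_filas : Int) : Decidable (Pre_generar_pos ancho_bloque ancho_pantalla alto_bloque num_filas) := by unfold Pre_generar_pos; infer_instance

def pvWitness_generar_pos : Int × Int × Int × Int := (10, 30, 5, 2)

def Spec_generar_pos (ancho_bloque : Int) (ancho_pantalla : Int) (alto_bloque : Int) (num_filas : Int) (out : List (List (Int × Int))) : Prop := out = generar_pos_alt ancho_bloque ancho_pantalla alto_bloque num_filas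
instance (ancho_bloque : Int) (ancho_pantalla : Int) (alto_bloque : Int) (num_filas : Int) (out : List (List (Int × Int))) : Decidable (Spec_generar_pos ancho_bloque ancho_pantalla alto_bloque num_filas out) := by unfold Spec_generar_pos; infer_instance

-- ===== CLAIM (what is proved, stated in full; the proofs are below) =====
def Claim_equal_generar_pos : Prop := ∀ (ancho_bloque : Int) (ancho_pantalla : Int) (alto_bloque : Int) (num_filas : Int), Dom_generar_pos ancho_bloque ancho_pantalla alto_bloque num_filas → Pre_generar_pos ancho_bloque ancho_pantalla alto_bloque num_filas → Spec_generar_pos ancho_bloque ancho_pantalla alto_bloque num_filas (generar_pos ancho_bloque ancho_pantalla alto_bloque num_filas)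

-- ===== LEMMAS AND PROOFS =====

-- Common closed form both loops are reduced to: row j of an n-row grid.
def pvRow (ab alb : Int) (m : Nat) (j : Nat) : List (Int × Int) :=
  (List.range m).map (fun i : Nat => ((i : Int) * ab, (j : Int) * alb))

def pvGrid (ab alb : Int) (m n : Nat) : List (List (Int × Int)) :=
  (List.range n).map (pvRow ab alb m)

-- A's inner loop: appending (x, y) and advancing x by ab yields the closed-form row.
theorem inner_fold_eq (ab y : Int) (l : List Int) : ∀ (acc : List (Int × Int)) (x0 : Int),
    l.foldl (fun (fx : List (Int × Int) × Int) (_ : Int) => (fx.1 ++ [(fx.2, y)], fx.2 + ab)) (acc, x0)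
      = (acc ++ (List.range l.length).map (fun i : Nat => (x0 + (i : Int) * ab, y)), x0 + (l.length : Int) * ab) := by
  induction l with
  | nil => intro acc x0; simp
  | cons a t ih =>
    intro acc x0
    simp only [List.foldl_cons, ih]
    simp only [Prod.mk.injEq]
    refine ⟨?_, by simp only [List.length_cons]; push_cast; ring⟩
    rw [List.length_cons, List.range_succ_eq_map]
    simp only [List.map_cons, Nat.cast_zero, zero_mul, add_zero, List.map_map,
      List.append_assoc, List.singleton_append]
    refine congrArg (acc ++ ·) ?_
    refine congrArg ((x0, y) :: ·) ?_
    apply List.map_congr_left; intro i _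
    simp only [Function.comp_def, Prod.mk.injEq]
    push_cast
    exact ⟨by ring, trivial⟩

-- A's outer loop after the inner loop has been replaced by its closed form.
theorem outer_simple (ab alb : Int) (m : Nat) (l : List Int) : ∀ (acc : List (List (Int × Int))) (y0 : Int),
    l.foldl
      (fun (st : List (List (Int × Int)) × Int × Int) (_ : Int) =>
        (st.1 ++ [(List.range m).map (fun i : Nat => (st.2.1 + (i : Int) * ab, st.2.2))], 0, st.2.2 + alb))
      ((acc, 0, y0) : List (List (Int × Int)) × Int × Int)
      = (acc ++ (List.range l.length).map
            (fun j : Nat => (List.range m).map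
              (fun i : Nat => ((0 : Int) + (i : Int) * ab, y0 + (j : Int) * alb))),
          0, y0 + (l.length : Int) * alb) := by
  induction l with
  | nil => intro acc y0; simp
  | cons a t ih =>
    intro acc y0
    simp only [List.foldl_cons, ih]
    simp only [Prod.mk.injEq]
    refine ⟨?_, trivial, by simp only [List.length_cons]; push_cast; ring⟩
    rw [List.length_cons, List.range_succ_eq_map]
    simp only [List.map_cons, Nat.cast_zero, zero_mul, add_zero, List.map_map,
      List.append_assoc, List.singleton_append]
    refine congrArg (acc ++ ·) ?_
    refine congrArg (_ :: ·) ?_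
    apply List.map_congr_left; intro j _
    simp only [Function.comp_def]
    apply List.map_congr_left; intro i _
    simp only [Prod.mk.injEq]
    push_cast
    exact ⟨trivial, by ring⟩

-- A's fold equals the closed-form grid.
theorem a_eq_grid (ab ap alb nf : Int) :
    generar_pos ab ap alb nf
      = pvGrid ab alb (PySem.List.pyRange 0 (PySem.Int.floordiv ap ab) 1).length
          (PySem.List.pyRange 0 nf 1).length := by
  unfold generar_pos pvGrid pvRow
  simp only [inner_fold_eq, List.nil_append]
  rw [outer_simple]
  simp only [List.nil_append]
  apply List.map_congr_left; intro j _
  apply List.map_congr_left; intro i _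
  simp only [Prod.mk.injEq]
  constructor <;> ring

-- the last row of a nonempty grid
theorem grid_getLast? (ab alb : Int) (m k : Nat) :
    (pvGrid ab alb m (k + 1)).getLast? = some (pvRow ab alb m k) := by
  unfold pvGrid
  rw [List.range_succ, List.map_append]
  simp

-- shifting a row down by alb gives the next row
theorem row_shift (ab alb : Int) (m k : Nat) :
    (pvRow ab alb m k).map (fun p => (p.1, p.2 + alb)) = pvRow ab alb m (k + 1) := by
  unfold pvRow
  rw [List.map_map]
  apply List.map_congr_left; intro i _
  simp only [Function.comp_def, Prod.mk.injEq]
  push_cast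
  exact ⟨trivial, by ring⟩

-- the first row of the grid, as B's none-branch computes it
theorem row_zero (ab alb : Int) (c : Int) :
    (PySem.List.pyRange 0 c 1).map (fun i => (i * ab, (0 : Int)))
      = pvRow ab alb (PySem.List.pyRange 0 c 1).length 0 := by
  unfold pvRow
  rw [PySem.List.pyRange_one]
  simp only [List.map_map, List.length_map, List.length_range]
  apply List.map_congr_left; intro k _
  simp

-- appending the next row extends the grid
theorem grid_append (ab alb : Int) (m n : Nat) :
    pvGrid ab alb m n ++ [pvRow ab alb m n] = pvGrid ab alb m (n + 1) := by
  unfold pvGrid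
  rw [List.range_succ, List.map_append]
  simp

-- B's loop preserves the grid invariant.
theorem b_fold (ab alb : Int) (c : Int) (l : List Int) : ∀ (n : Nat),
    l.foldl
      (fun (pos : List (List (Int × Int))) (_ : Int) =>
        let fila := match pos.getLast? with
          | none => (PySem.List.pyRange 0 c 1).map (fun i => (i * ab, (0 : Int)))
          | some prev => prev.map (fun p => (p.1, p.2 + alb))
        pos ++ [fila])
      (pvGrid ab alb (PySem.List.pyRange 0 c 1).length n)
      = pvGrid ab alb (PySem.List.pyRange 0 c 1).length (n + l.length) := by
  induction l with
  | nil => intro n; simp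
  | cons a t ih =>
    intro n
    rw [List.foldl_cons]
    have hstep :
        (let fila := match (pvGrid ab alb (PySem.List.pyRange 0 c 1).length n).getLast? with
          | none => (PySem.List.pyRange 0 c 1).map (fun i => (i * ab, (0 : Int)))
          | some prev => prev.map (fun p => (p.1, p.2 + alb))
         pvGrid ab alb (PySem.List.pyRange 0 c 1).length n ++ [fila])
          = pvGrid ab alb (PySem.List.pyRange 0 c 1).length (n + 1) := by
      cases n with
      | zero =>
        show pvGrid ab alb _ 0 ++ [_] = _
        have h0 : (pvGrid ab alb (PySem.List.pyRange 0 c 1).length 0).getLast? = none := by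
          simp [pvGrid]
        rw [h0]
        rw [row_zero ab alb c]
        exact grid_append ab alb _ 0
      | succ k =>
        rw [grid_getLast? ab alb _ k]
        show pvGrid ab alb (PySem.List.pyRange 0 c 1).length (k + 1) ++
            [(pvRow ab alb (PySem.List.pyRange 0 c 1).length k).map (fun p => (p.1, p.2 + alb))]
            = _
        rw [row_shift ab alb _ k]
        exact grid_append ab alb _ (k + 1)
    rw [hstep, ih (n + 1)]
    congr 1
    simp only [List.length_cons]
    omega

theorem b_eq_grid (ab ap alb nf : Int) :
    generar_pos_alt ab ap alb nf
      = pvGrid ab alb (PySem.List.pyRange 0 (PySem.Int.floordiv ap ab) 1).length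
          (PySem.List.pyRange 0 nf 1).length := by
  have h := b_fold ab alb (PySem.Int.floordiv ap ab) (PySem.List.pyRange 0 nf 1) 0
  unfold generar_pos_alt
  simpa [pvGrid] using h

-- ===== VERDICT (by name: the statement is the Claim_ definition above) =====
theorem generar_pos_spec : Claim_equal_generar_pos := by
  intro ab ap alb nf _ _
  unfold Spec_generar_pos
  rw [a_eq_grid, b_eq_grid]
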